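-- pv_equiv track=rewrite | github.com/tdhris/MyBookShelf | bookshelf/views.py | get_alphabetic_dictionary
-- ===== SOURCE A (Python) =====
-- from collections import OrderedDict
--
-- def get_alphabetic_dictionary(objects):
--     objects = sorted(objects)
--     alphabetic_dictionary = {first_letter:
--                              [object for object in objects
--                               if str(object).startswith(first_letter)]
--                              for first_letter in set(str(object)[0]
--                                                      for object in objects)}
--     return OrderedDict(sorted(alphabetic_dictionary.items(), key=lambda t: t[0]))
-- ===== SOURCE B (Python) =====
-- from collections import OrderedDict
--
--
-- def get_alphabetic_dictionary(objects):
--     def runs(objs):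
--         if not objs:
--             return []
--         letter = str(objs[0])[0]
--         i = 1
--         while i < len(objs) and str(objs[i])[0] == letter:
--             i += 1
--         return [(letter, objs[:i])] + runs(objs[i:])
--     return OrderedDict(runs(sorted(objects)))
-- ===== Notes on version B (the rewrite author's own statement) =====
-- stated objective: alternative
-- what changed: Replaces A's set-of-first-letters plus one full filter scan per distinct letter (dict comprehension) and final key sort by run-length grouping: sort once, then recursively split the sorted list into maximal runs of equal first letter, which are already in key order, so no dict and no final sort (intended as faster; measured ~1.6x at the largest size but not consistently over the 1.5x bar).
import Mathlib
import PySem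

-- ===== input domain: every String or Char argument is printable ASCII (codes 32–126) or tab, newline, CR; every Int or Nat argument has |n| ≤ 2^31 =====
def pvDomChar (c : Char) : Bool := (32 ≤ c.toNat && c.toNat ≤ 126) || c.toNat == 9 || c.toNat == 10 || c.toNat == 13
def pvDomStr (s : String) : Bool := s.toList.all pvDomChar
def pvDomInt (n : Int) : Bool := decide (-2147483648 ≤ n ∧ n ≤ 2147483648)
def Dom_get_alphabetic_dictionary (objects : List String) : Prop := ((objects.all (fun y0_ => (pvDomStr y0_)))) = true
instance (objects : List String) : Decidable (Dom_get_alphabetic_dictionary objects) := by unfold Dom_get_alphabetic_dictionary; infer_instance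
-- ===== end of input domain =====

-- B replaces A's set-of-first-letters plus one filter scan per distinct letter by run-length
-- grouping: sort once, then recursively split the sorted list into maximal runs of equal first
-- letter (already in key order, so no dict and no final key sort).

-- str(o)[0] as a one-char string; "" stands in for Python's IndexError on "" (excluded by Pre_)
def pvFirst (o : String) : String :=
  match PySem.Str.pyGet? o 0 with
  | some c => String.ofList [c]
  | none => ""

-- ===== PORT A =====
def get_alphabetic_dictionary (objects : List String) : List (String × List String) :=
  let objs := PySem.List.sorted objects (fun x => x) false
  let keys := PySem.Set.ofList (objs.map pvFirst)
  let d := keys.foldl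
    (fun d fl => d.insert fl (objs.filter (fun o => PySem.Str.startswith o fl)))
    (PySem.Dict.empty : PySem.Dict String (List String))
  PySem.List.sorted d.items (fun t => t.1) false

-- ===== PORT B =====
-- runs(objs): split the sorted list into maximal runs sharing the first letter
-- (the Python while-loop span objs[:i] / objs[i:] is takeWhile / dropWhile)
def pvRuns : List String → List (String × List String)
  | [] => []
  | o :: rest =>
    let letter := pvFirst o
    (letter, o :: rest.takeWhile (fun x => pvFirst x == letter)) ::
      pvRuns (rest.dropWhile (fun x => pvFirst x == letter))
termination_by l => l.length
decreasing_by
  exact Nat.lt_succ_of_le (rest.dropWhile_sublist _).length_le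

def get_alphabetic_dictionary_alt (objects : List String) : List (String × List String) :=
  pvRuns (PySem.List.sorted objects (fun x => x) false)

-- ===== PRECONDITION & SPEC =====
-- Pre_ excludes lists containing the empty string, on which A raises IndexError at str(object)[0]
-- (B raises the same IndexError there).
def Pre_get_alphabetic_dictionary (objects : List String) : Prop := ∀ o ∈ objects, o ≠ ""
instance (objects : List String) : Decidable (Pre_get_alphabetic_dictionary objects) := by unfold Pre_get_alphabetic_dictionary; infer_instance
def pvWitness_get_alphabetic_dictionary : List String := ["banana", "apple", "avocado"]
def Spec_get_alphabetic_dictionary (objects : List String) (out : List (String × List String)) : Prop := out = get_alphabetic_dictionary_alt objects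
instance (objects : List String) (out : List (String × List String)) : Decidable (Spec_get_alphabetic_dictionary objects out) := by unfold Spec_get_alphabetic_dictionary; infer_instance

-- ===== CLAIM (what is proved, stated in full; the proofs are below) =====
def Claim_equal_get_alphabetic_dictionary : Prop := ∀ (objects : List String), Dom_get_alphabetic_dictionary objects → Pre_get_alphabetic_dictionary objects → Spec_get_alphabetic_dictionary objects (get_alphabetic_dictionary objects)

-- ===== LEMMAS AND PROOFS =====

theorem pvFirst_cons (o : String) (c0 : Char) (rest : List Char) (hl : o.toList = c0 :: rest) :
    pvFirst o = String.ofList [c0] := by unfold pvFirst; simp [pysem, hl]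

theorem pvFirst_head (o : String) (ho : o ≠ "") :
    ∃ c rest, o.toList = c :: rest ∧ pvFirst o = String.ofList [c] := by
  cases h : o.toList with
  | nil => exact absurd (by ext : 1; simp [h]) ho
  | cons a l => exact ⟨a, l, rfl, pvFirst_cons o a l h⟩

-- for a nonempty o and a one-char k, o.startswith(k) is exactly 'first letter of o equals k'
theorem startswith_first (o k : String) (c : Char) (hk : k = String.ofList [c]) (ho : o ≠ "") :
    PySem.Str.startswith o k = (pvFirst o == k) := by
  obtain ⟨c0, rest, hl, hf⟩ := pvFirst_head o ho
  rw [hf, hk]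
  by_cases hc : c0 = c
  · subst hc
    simp [PySem.Str.startswith, PySem.Chars.startswith_iff, hl]
  · have h1 : PySem.Str.startswith o (String.ofList [c]) = false := by
      simp only [PySem.Str.startswith_eq]
      rw [Bool.eq_false_iff]
      intro h
      have := PySem.Chars.startswith_iff _ _ |>.mp (by simpa using h)
      simp [hl] at this
      exact hc this.symm
    rw [h1]
    symm; rw [beq_eq_false_iff_ne]
    intro h
    apply hc
    have := congrArg String.toList h
    simpa using this

-- a ≤ b on nonempty strings gives pvFirst a ≤ pvFirst b (head characters compare)
theorem pvFirst_mono (a b : String) (ha : a ≠ "") (hb : b ≠ "") (h : a ≤ b) :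
    pvFirst a ≤ pvFirst b := by
  obtain ⟨x, xs, hxl, hxf⟩ := pvFirst_head a ha
  obtain ⟨y, ys, hyl, hyf⟩ := pvFirst_head b hb
  rw [hxf, hyf, String.le_iff_toList_le, String.toList_ofList, String.toList_ofList]
  rw [String.le_iff_toList_le, hxl, hyl] at h
  by_contra hlt
  rw [not_le] at hlt
  have hyx : y < x := by
    rcases List.cons_lt_cons_iff.mp hlt with h' | ⟨_, h'⟩
    · exact h'
    · exact absurd h' (by simp)
  exact absurd (List.cons_lt_cons_iff.mpr (Or.inl hyx)) (not_lt.mpr h)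

-- skipping an element already present leaves a Set.add fold unchanged
theorem foldl_add_filter {α : Type} [BEq α] [LawfulBEq α] (l : List α) (s : PySem.Set α) (x : α)
    (hx : x ∈ s) :
    l.foldl PySem.Set.add s = (l.filter (fun y => !(y == x))).foldl PySem.Set.add s := by
  induction l generalizing s with
  | nil => rfl
  | cons a t ih =>
    by_cases hax : a = x
    · subst hax
      have hadd : PySem.Set.add s a = s := by simp [PySem.Set.add, PySem.Set.contains, hx]
      have hfil : (a :: t).filter (fun y => !(y == a)) = t.filter (fun y => !(y == a)) := by
        simp
      rw [hfil, List.foldl_cons, hadd]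
      exact ih s hx
    · have hkeep : (!(a == x)) = true := by simp [hax]
      rw [List.filter_cons, if_pos hkeep, List.foldl_cons, List.foldl_cons]
      apply ih
      by_cases hmem : a ∈ s
      · simpa [PySem.Set.add, PySem.Set.contains, hmem] using hx
      · simp [PySem.Set.add, PySem.Set.contains, hmem]
        exact Or.inl hx

-- a fold over elements all different from k keeps a leading k in place
theorem foldl_add_cons_notmem {α : Type} [BEq α] [LawfulBEq α] (m : List α) (k : α)
    (hm : ∀ y ∈ m, y ≠ k) (s : PySem.Set α) :
    m.foldl PySem.Set.add (k :: s) = k :: m.foldl PySem.Set.add s := by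
  induction m generalizing s with
  | nil => rfl
  | cons a t ih =>
    have hak : a ≠ k := hm a (by simp)
    have ht : ∀ y ∈ t, y ≠ k := fun y hy => hm y (by simp [hy])
    by_cases hmem : a ∈ s
    · have h1 : PySem.Set.add (k :: s) a = k :: s := by
        simp [PySem.Set.add, PySem.Set.contains, hmem]
      have h2 : PySem.Set.add s a = s := by simp [PySem.Set.add, PySem.Set.contains, hmem]
      rw [List.foldl_cons, List.foldl_cons, h1, h2, ih ht s]
    · have h1 : PySem.Set.add (k :: s) a = k :: (s ++ [a]) := by
        simp [PySem.Set.add, PySem.Set.contains, hmem, hak]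
      have h2 : PySem.Set.add s a = s ++ [a] := by simp [PySem.Set.add, PySem.Set.contains, hmem]
      rw [List.foldl_cons, List.foldl_cons, h1, h2, ih ht (s ++ [a])]

-- Set.ofList structural law: first occurrence kept, later duplicates dropped
theorem ofList_cons_filter {α : Type} [BEq α] [LawfulBEq α] (k : α) (l : List α) :
    PySem.Set.ofList (k :: l) = k :: PySem.Set.ofList (l.filter (fun y => !(y == k))) := by
  have h0 : PySem.Set.ofList (k :: l) = l.foldl PySem.Set.add [k] := by
    rw [PySem.Set.ofList_eq_foldl]
    simp [List.foldl, PySem.Set.add, PySem.Set.contains]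
  rw [h0, foldl_add_filter l [k] k (by simp)]
  have hne : ∀ y ∈ l.filter (fun y => !(y == k)), y ≠ k := by
    intro y hy
    have := List.of_mem_filter hy
    simpa using this
  have := foldl_add_cons_notmem (l.filter (fun y => !(y == k))) k hne []
  rw [show ([k] : PySem.Set α) = k :: ([] : List α) from rfl, this, PySem.Set.ofList_eq_foldl]

theorem ofList_sublist_fuel {α : Type} [BEq α] [LawfulBEq α] (n : Nat) :
    ∀ l : List α, l.length ≤ n → (PySem.Set.ofList l).Sublist l := by
  induction n with
  | zero =>
    intro l hl
    have : l = [] := List.eq_nil_of_length_eq_zero (Nat.le_zero.mp hl)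
    subst this
    simp [PySem.Set.ofList_eq_foldl]
  | succ n ih =>
    intro l hl
    cases l with
    | nil => simp [PySem.Set.ofList_eq_foldl]
    | cons k t =>
      rw [ofList_cons_filter]
      refine List.Sublist.cons₂ k ?_
      have h1 := ih (t.filter (fun y => !(y == k)))
        (le_trans (List.length_filter_le _ _) (Nat.succ_le_succ_iff.mp hl))
      exact h1.trans List.filter_sublist

theorem ofList_sublist {α : Type} [BEq α] [LawfulBEq α] (l : List α) :
    (PySem.Set.ofList l).Sublist l :=
  ofList_sublist_fuel l.length l le_rfl

-- the run decomposition computes, for key-sorted nonempty-string input, exactly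
-- 'distinct first letters in order, each with the filter of the whole list'
theorem runs_eq_fuel (n : Nat) : ∀ objs : List String, objs.length ≤ n →
    (∀ o ∈ objs, o ≠ "") →
    objs.Pairwise (fun a b => pvFirst a ≤ pvFirst b) →
    pvRuns objs
      = (PySem.Set.ofList (objs.map pvFirst)).map
          (fun k => (k, objs.filter (fun o => pvFirst o == k))) := by
  induction n with
  | zero =>
    intro objs hl _ _
    have : objs = [] := List.eq_nil_of_length_eq_zero (Nat.le_zero.mp hl)
    subst this
    simp [pvRuns, PySem.Set.ofList_eq_foldl]
  | succ n ih =>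
    intro objs hl hne hpw
    cases objs with
    | nil => simp [pvRuns, PySem.Set.ofList_eq_foldl]
    | cons o rest =>
      have hstep : pvRuns (o :: rest)
          = (pvFirst o, o :: rest.takeWhile (fun x => pvFirst x == pvFirst o)) ::
              pvRuns (rest.dropWhile (fun x => pvFirst x == pvFirst o)) := by
        rw [pvRuns]
      set k := pvFirst o with hk
      set tk := rest.takeWhile (fun x => pvFirst x == k) with htk
      set dp := rest.dropWhile (fun x => pvFirst x == k) with hdp
      have hsplit : tk ++ dp = rest := List.takeWhile_append_dropWhile
      have htkall : ∀ x ∈ tk, pvFirst x = k := by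
        intro x hx
        have h' : (pvFirst x == k) = true := by simpa using List.mem_takeWhile_imp hx
        exact eq_of_beq h' 
      have hrestmem : ∀ x ∈ dp, x ∈ rest := fun x hx =>
        (rest.dropWhile_sublist (fun x => pvFirst x == k)).subset hx
      have hcons := List.pairwise_cons.mp hpw
      have hok : ∀ x ∈ rest, k ≤ pvFirst x := hcons.1
      have hpw_rest := hcons.2
      have hpwdp : dp.Pairwise (fun a b => pvFirst a ≤ pvFirst b) :=
        hpw_rest.sublist (rest.dropWhile_sublist _)
      have hdplt : ∀ x ∈ dp, k < pvFirst x := by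
        cases hd : dp with
        | nil => simp
        | cons d ds =>
          have hpd : (pvFirst d == k) = false := by
            have := List.head_dropWhile_not (fun x => pvFirst x == k) (l := rest)
              (by rw [← hdp, hd]; simp)
            simpa [← hdp, hd] using this
          have hdne : pvFirst d ≠ k := by simpa using hpd
          have hdlt : k < pvFirst d :=
            lt_of_le_of_ne (hok d (hrestmem d (by simp [hd]))) (Ne.symm hdne)
          have hpw2 := hpwdp
          rw [hd] at hpw2
          intro x hx
          rcases List.mem_cons.mp hx with rfl | hx'
          · exact hdlt
          · exact lt_of_lt_of_le hdlt ((List.pairwise_cons.mp hpw2).1 x hx')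
      have hdpne : ∀ x ∈ dp, pvFirst x ≠ k := fun x hx => ne_of_gt (hdplt x hx)
      have hfilterkeys : ((rest.map pvFirst).filter (fun y => !(y == k))) = dp.map pvFirst := by
        rw [← hsplit, List.map_append, List.filter_append]
        have h1 : (tk.map pvFirst).filter (fun y => !(y == k)) = [] := by
          rw [List.filter_eq_nil_iff]
          intro a ha
          obtain ⟨x, hx, rfl⟩ := List.mem_map.mp ha
          simp [htkall x hx]
        have h2 : (dp.map pvFirst).filter (fun y => !(y == k)) = dp.map pvFirst := by
          rw [List.filter_eq_self]
          intro a ha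
          obtain ⟨x, hx, rfl⟩ := List.mem_map.mp ha
          simp [hdpne x hx]
        rw [h1, h2, List.nil_append]
      have hkeys : PySem.Set.ofList ((o :: rest).map pvFirst)
          = k :: PySem.Set.ofList (dp.map pvFirst) := by
        rw [List.map_cons, ofList_cons_filter, hfilterkeys]
      have hfk : (o :: rest).filter (fun x => pvFirst x == k) = o :: tk := by
        rw [List.filter_cons, if_pos (by simp [← hk]), ← hsplit, List.filter_append]
        have h1 : tk.filter (fun x => pvFirst x == k) = tk := by
          rw [List.filter_eq_self]
          intro x hx
          simp [htkall x hx]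
        have h2 : dp.filter (fun x => pvFirst x == k) = [] := by
          rw [List.filter_eq_nil_iff]
          intro x hx
          simp [hdpne x hx]
        rw [h1, h2, List.append_nil]
      have hlen : dp.length ≤ n :=
        le_trans (rest.dropWhile_sublist _).length_le (Nat.succ_le_succ_iff.mp hl)
      have hnedp : ∀ x ∈ dp, x ≠ "" := fun x hx => hne x (by simp [hrestmem x hx])
      rw [hstep, ih dp hlen hnedp hpwdp, hkeys, List.map_cons, ← hfk]
      congr 1
      apply List.map_congr_left
      intro k' hk'
      obtain ⟨x, hxdp, rfl⟩ := List.mem_map.mp ((PySem.Set.mem_ofList _ _).mp hk')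
      have hxne : ∀ y ∈ o :: tk, pvFirst y ≠ pvFirst x := by
        intro y hy
        have hyk : pvFirst y = k := by
          rcases List.mem_cons.mp hy with rfl | hy'
          · exact hk.symm
          · exact htkall y hy'
        rw [hyk]
        exact ne_of_lt (hdplt x hxdp)
      have hfilter : (o :: rest).filter (fun o => pvFirst o == pvFirst x)
          = dp.filter (fun o => pvFirst o == pvFirst x) := by
        rw [show (o :: rest) = (o :: tk) ++ dp by rw [List.cons_append, hsplit]]
        rw [List.filter_append]
        have h1 : (o :: tk).filter (fun o => pvFirst o == pvFirst x) = [] := by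
          rw [List.filter_eq_nil_iff]
          intro y hy
          simp [hxne y hy]
        rw [h1, List.nil_append]
      rw [hfilter]

theorem runs_eq (objs : List String) (hne : ∀ o ∈ objs, o ≠ "")
    (hpw : objs.Pairwise (fun a b => pvFirst a ≤ pvFirst b)) :
    pvRuns objs
      = (PySem.Set.ofList (objs.map pvFirst)).map
          (fun k => (k, objs.filter (fun o => pvFirst o == k))) :=
  runs_eq_fuel objs.length objs le_rfl hne hpw

theorem ports_eq (objects : List String) (h : ∀ o ∈ objects, o ≠ "") :
    get_alphabetic_dictionary objects = get_alphabetic_dictionary_alt objects := by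
  unfold get_alphabetic_dictionary get_alphabetic_dictionary_alt
  set objs := PySem.List.sorted objects (fun x => x) false with hobjs
  have hne : ∀ o ∈ objs, o ≠ "" := fun o ho => h o ((PySem.List.mem_sorted _ _ _ _).mp ho)
  have hpwS : objs.Pairwise (fun a b => a ≤ b) := by
    have := PySem.List.sorted_pairwise (xs := objects) (key := fun x => x)
    simpa [← hobjs] using this
  have hpw : objs.Pairwise (fun a b => pvFirst a ≤ pvFirst b) := by
    refine hpwS.imp_of_mem ?_
    intro a b ha hb hab
    exact pvFirst_mono a b (hne a ha) (hne b hb) hab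
  set keys := PySem.Set.ofList (objs.map pvFirst) with hkeys
  have hAitems : (keys.foldl
       (fun d fl => d.insert fl (objs.filter (fun o => PySem.Str.startswith o fl)))
       (PySem.Dict.empty : PySem.Dict String (List String))).items
      = keys.map (fun fl => (fl, objs.filter (fun o => PySem.Str.startswith o fl))) := by
    rw [show (fun (d : PySem.Dict String (List String)) fl => d.insert fl (objs.filter (fun o => PySem.Str.startswith o fl))) = (fun d fl => d.insert (id fl) ((fun fl => objs.filter (fun o => PySem.Str.startswith o fl)) fl)) from rfl]
    rw [PySem.Dict.items_foldl_insert_fresh keys id _ _ (by simp) (by rw [List.map_id, hkeys]; exact PySem.Set.nodup_ofList (objs.map pvFirst))]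
    rfl
  have hmapeq : keys.map (fun fl => (fl, objs.filter (fun o => PySem.Str.startswith o fl)))
      = keys.map (fun fl => (fl, objs.filter (fun o => pvFirst o == fl))) := by
    apply List.map_congr_left
    intro fl hfl
    obtain ⟨x, hx, rfl⟩ := List.mem_map.mp ((PySem.Set.mem_ofList _ _).mp hfl)
    obtain ⟨c, r0, hcl, hcf⟩ := pvFirst_head x (hne x hx)
    have : objs.filter (fun o => PySem.Str.startswith o (pvFirst x))
        = objs.filter (fun o => pvFirst o == pvFirst x) := by
      apply List.filter_congr
      intro o ho
      exact startswith_first o (pvFirst x) c hcf (hne o ho)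
    rw [this]
  have hB : pvRuns objs = keys.map (fun fl => (fl, objs.filter (fun o => pvFirst o == fl))) :=
    runs_eq objs hne hpw
  have hkple : keys.Pairwise (fun a b : String => a ≤ b) :=
    (List.pairwise_map.mpr hpw).sublist (ofList_sublist _)
  have hknd : keys.Pairwise (fun a b : String => a ≠ b) := PySem.Set.nodup_ofList _
  have hklt : keys.Pairwise (fun a b : String => a < b) :=
    (hkple.and hknd).imp fun hab => lt_of_le_of_ne hab.1 hab.2
  have hpairs : (keys.map (fun fl => (fl, objs.filter (fun o => pvFirst o == fl)))).Pairwise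
      (fun a b => a.1 < b.1) := List.pairwise_map.mpr hklt
  have hsortid := PySem.List.sorted_eq_of_perm_of_pairwise_lt
    (xs := keys.map (fun fl => (fl, objs.filter (fun o => pvFirst o == fl))))
    (key := fun t : String × List String => t.1)
    (ys := keys.map (fun fl => (fl, objs.filter (fun o => pvFirst o == fl))))
    (List.Perm.refl _) hpairs
  simp only []
  rw [hAitems, hmapeq]
  exact hsortid.trans hB.symm

-- ===== VERDICT (by name: the statement is the Claim_ definition above) =====
theorem get_alphabetic_dictionary_spec : Claim_equal_get_alphabetic_dictionary := by
  intro objects _ hpre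
  unfold Spec_get_alphabetic_dictionary
  exact ports_eq objects hpre
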